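-- pv_equiv track=rewrite | github.com/Sameer411/Plagiarism-Detection-Software | BUFFER/CODE_PLAGIARISM_DETECTION_ALGORITHMS.py | Rabin_Karp_hash_function
-- ===== SOURCE A (Python) =====
-- def Rabin_Karp_hash_function(string):
-- 	last_hash=0;
-- 	for i in range(len(string)):
-- 		if i != (len(string)-1):
-- 			last_hash=((last_hash+ord(string[i]))*256)
-- 			last_hash%=101
-- 		else:
-- 			last_hash=(last_hash+ord(string[i]))%101
-- 	return last_hash
-- ===== SOURCE B (Python) =====
-- def Rabin_Karp_hash_function(string):
--     n = len(string)
--     return sum(ord(c) * pow(256, n - 1 - i, 101) for i, c in enumerate(string)) % 101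
-- ===== Notes on version B (the rewrite author's own statement) =====
-- stated objective: alternative
-- what changed: Replaces the Horner-style loop (accumulator repeatedly scaled by 256 and reduced mod 101) with a direct positional polynomial sum: each character contributes ord(c)*pow(256, n-1-i, 101) and the sum is reduced once.
import Mathlib
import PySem

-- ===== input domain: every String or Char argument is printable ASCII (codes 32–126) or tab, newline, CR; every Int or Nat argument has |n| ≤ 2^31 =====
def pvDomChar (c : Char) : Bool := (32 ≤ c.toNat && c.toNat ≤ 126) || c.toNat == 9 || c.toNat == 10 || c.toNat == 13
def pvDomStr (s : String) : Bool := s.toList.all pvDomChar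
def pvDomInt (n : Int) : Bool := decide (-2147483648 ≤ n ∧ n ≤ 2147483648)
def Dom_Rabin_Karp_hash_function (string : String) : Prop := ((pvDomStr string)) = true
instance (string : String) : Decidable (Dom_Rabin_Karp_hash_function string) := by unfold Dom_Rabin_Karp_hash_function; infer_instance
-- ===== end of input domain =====

-- B replaces A's Horner-style multiply-and-reduce loop with a direct positional
-- polynomial sum using per-character modular powers pow(256, n-1-i, 101); same cost, different decomposition.


-- ===== PORT A =====
-- for i in range(len(string)): Horner-style accumulate; string[i] with i in range(len) is
-- always a valid index, so the total pyGetD is exact here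
def Rabin_Karp_hash_function (string : String) : Int :=
  (PySem.List.pyRange 0 (string.toList.length : Int) 1).foldl
    (fun last_hash i =>
      if i ≠ (string.toList.length : Int) - 1 then
        PySem.Int.mod ((last_hash + ((PySem.List.pyGetD string.toList i ' ').toNat : Int)) * 256) 101
      else
        PySem.Int.mod (last_hash + ((PySem.List.pyGetD string.toList i ' ').toNat : Int)) 101)
    0

-- ===== PORT B =====
-- sum(ord(c) * pow(256, n-1-i, 101) for i, c in enumerate(string)) % 101
-- (the exponent n-1-i is never negative for i < n, so the .toNat cast is exact)
def Rabin_Karp_hash_function_alt (string : String) : Int :=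
  PySem.Int.mod
    (((PySem.List.enumerate string.toList).map
        (fun p => (p.2.toNat : Int) *
          PySem.Int.powMod 256 ((string.toList.length : Int) - 1 - p.1).toNat 101)).sum)
    101

-- ===== PRECONDITION & SPEC =====
def Spec_Rabin_Karp_hash_function (string : String) (out : Int) : Prop := out = Rabin_Karp_hash_function_alt string
instance (string : String) (out : Int) : Decidable (Spec_Rabin_Karp_hash_function string out) := by unfold Spec_Rabin_Karp_hash_function; infer_instance

-- ===== CLAIM (what is proved, stated in full; the proofs are below) =====
def Claim_equal_Rabin_Karp_hash_function : Prop := ∀ (string : String), Dom_Rabin_Karp_hash_function string → Spec_Rabin_Karp_hash_function string (Rabin_Karp_hash_function string)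

-- ===== LEMMAS AND PROOFS =====

-- the integer polynomial c0*256^(n-1) + … + c_{n-1} that both programs reduce mod 101
def pvPoly : List Char → Int
  | [] => 0
  | c :: t => (c.toNat : Int) * 256 ^ t.length + pvPoly t

theorem pvMulModL (x y z : Int) : (x % 101 * y + z) % 101 = (x * y + z) % 101 := by
  conv_lhs => rw [Int.add_emod, Int.mul_emod, Int.emod_emod_of_dvd x dvd_rfl,
    ← Int.mul_emod, ← Int.add_emod]

theorem pvMulModR (x y z : Int) : (x * (y % 101) + z) % 101 = (x * y + z) % 101 := by
  conv_lhs => rw [Int.add_emod, Int.mul_emod, Int.emod_emod_of_dvd y dvd_rfl,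
    ← Int.mul_emod, ← Int.add_emod]

theorem pvAddModCongr (x a b : Int) (h : a % 101 = b % 101) : (x + a) % 101 = (x + b) % 101 := by
  rw [Int.add_emod, h, ← Int.add_emod]

theorem pvLoopA (cs : List Char) (t : List Char) (a acc : Int) (ha : 0 ≤ a)
    (hd : cs.drop a.toNat = t) (hne : t ≠ []) :
    (PySem.List.pyRange a (cs.length : Int) 1).foldl
      (fun last_hash i =>
        if i ≠ (cs.length : Int) - 1 then
          PySem.Int.mod ((last_hash + ((PySem.List.pyGetD cs i ' ').toNat : Int)) * 256) 101
        else
          PySem.Int.mod (last_hash + ((PySem.List.pyGetD cs i ' ').toNat : Int)) 101)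
      acc
    = (acc * 256 ^ (t.length - 1) + pvPoly t) % 101 := by
  induction t generalizing a acc with
  | nil => exact absurd rfl hne
  | cons c t' ih =>
    have hlen : a.toNat + (t'.length + 1) = cs.length := by
      have h1 := congrArg List.length hd
      simp only [List.length_drop, List.length_cons] at h1
      omega
    have hget : PySem.List.pyGetD cs a ' ' = c := by
      have h3 : cs[a.toNat]? = some c := by
        have h4 := congrArg (fun l => l[0]?) hd
        simpa [List.getElem?_drop] using h4
      rw [PySem.List.pyGetD_eq_getElem cs ' ' ha (by omega),
        List.getElem?_eq_getElem (by omega)] at *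
      exact Option.some.inj h3
    have hd' : cs.drop (a + 1).toNat = t' := by
      have h1 : (a + 1).toNat = a.toNat + 1 := by omega
      rw [h1, ← List.drop_drop, hd]; rfl
    by_cases ht : t' = []
    · subst ht
      have hn : (cs.length : Int) = a + 1 := by simp at hlen; omega
      rw [hn, PySem.List.pyRange_one_singleton]
      simp only [List.foldl_cons, List.foldl_nil, hget]
      have hno : ¬ (a ≠ a + 1 - 1) := by omega
      rw [if_neg hno, PySem.Int.mod_eq_emod_of_pos (by norm_num)]
      simp [pvPoly]
    · have hlt : a < (cs.length : Int) := by omega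
      rw [PySem.List.pyRange_one_cons hlt]
      simp only [List.foldl_cons, hget]
      have hne2 : a ≠ (cs.length : Int) - 1 := by
        have : 1 ≤ t'.length := List.length_pos_iff.mpr ht
        omega
      rw [if_pos hne2, ih (a + 1) _ (by omega) hd' ht,
          PySem.Int.mod_eq_emod_of_pos (by norm_num), pvMulModL]
      have h1 : 1 ≤ t'.length := List.length_pos_iff.mpr ht
      have hp : (256 : Int) * 256 ^ (t'.length - 1) = 256 ^ t'.length := by
        rw [← pow_succ']
        congr 1
        omega
      simp only [List.length_cons, Nat.add_sub_cancel, pvPoly]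
      rw [show (acc + (c.toNat : Int)) * 256 * 256 ^ (t'.length - 1)
            = (acc + (c.toNat : Int)) * (256 * 256 ^ (t'.length - 1)) by ring, hp]
      ring_nf

theorem pvA_eq_poly (s : String) :
    Rabin_Karp_hash_function s = pvPoly s.toList % 101 := by
  unfold Rabin_Karp_hash_function
  rcases h : s.toList with _ | ⟨c, t⟩
  · rw [PySem.List.pyRange_one_eq_nil (by simp)]
    simp [pvPoly]
  · rw [pvLoopA (c :: t) (c :: t) 0 0 le_rfl (by simp) (by simp)]
    ring_nf

theorem pvSumB (n : Int) (t : List Char) (s0 : Int) (hs : s0 + t.length = n) :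
    ((PySem.List.enumerate t s0).map
        (fun p => ((p.2.toNat : Int)) * PySem.Int.powMod 256 (n - 1 - p.1).toNat 101)).sum % 101
    = pvPoly t % 101 := by
  induction t generalizing s0 with
  | nil => rfl
  | cons c t' ih =>
    rw [PySem.List.enumerate_cons]
    simp only [List.map_cons, List.sum_cons]
    have he : (n - 1 - s0).toNat = t'.length := by simp at hs; omega
    rw [he, PySem.Int.powMod_eq_emod 256 t'.length (by norm_num), pvMulModR]
    have ih' := ih (s0 + 1) (by simp at hs ⊢; omega)
    simp only [pvPoly]
    exact pvAddModCongr _ _ _ ih'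

theorem pvB_eq_poly (s : String) :
    Rabin_Karp_hash_function_alt s = pvPoly s.toList % 101 := by
  unfold Rabin_Karp_hash_function_alt
  rw [PySem.Int.mod_eq_emod_of_pos (by norm_num)]
  exact pvSumB (s.toList.length : Int) s.toList 0 (by simp)

-- ===== VERDICT (by name: the statement is the Claim_ definition above) =====
theorem Rabin_Karp_hash_function_spec : Claim_equal_Rabin_Karp_hash_function := by
  intro s _
  unfold Spec_Rabin_Karp_hash_function
  rw [pvA_eq_poly, pvB_eq_poly]
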